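-- pv_equiv track=rewrite | github.com/KLayout/klayout | macbuild/nightlyBuild.py | Get_QAT_Directory
-- ===== SOURCE A (Python) =====
-- def Get_QAT_Directory( targetDic, platform ):
--     dirQAT = dict()
--
--     for qtVer in [5, 6]:
--         if qtVer == 5:
--             qtType = "Qt5"
--         elif qtVer == 6:
--             qtType = "Qt6"
--
--         for key in targetDic.keys():
--             target = targetDic[key]
--             if target == "std":
--                 dirQAT[(qtVer, "std", "r")] = '%sMP.build.macos-%s-release-RsysPsys.macQAT' % (qtType.lower(), platform)
--                 dirQAT[(qtVer, "std", "d")] = '%sMP.build.macos-%s-debug-RsysPsys.macQAT'   % (qtType.lower(), platform)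
--             elif target == "ports":
--                 dirQAT[(qtVer, "ports", "r")] = '%sMP.build.macos-%s-release-Rmp33Pmp312.macQAT' % (qtType.lower(), platform)
--                 dirQAT[(qtVer, "ports", "d")] = '%sMP.build.macos-%s-debug-Rmp33Pmp312.macQAT'   % (qtType.lower(), platform)
--             elif target == "brew":
--                 dirQAT[(qtVer, "brew", "r")] = '%sBrew.build.macos-%s-release-Rhb34Phb312.macQAT' % (qtType.lower(), platform)
--                 dirQAT[(qtVer, "brew", "d")] = '%sBrew.build.macos-%s-debug-Rhb34Phb312.macQAT'   % (qtType.lower(), platform)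
--             elif target == "brewHW":
--                 dirQAT[(qtVer, "brewHW", "r")] = '%sBrew.build.macos-%s-release-RsysPhb311.macQAT' % (qtType.lower(), platform)
--                 dirQAT[(qtVer, "brewHW", "d")] = '%sBrew.build.macos-%s-debug-RsysPhb311.macQAT'   % (qtType.lower(), platform)
--             elif target == "ana3":
--                 dirQAT[(qtVer, "ana3", "r")] = '%sAna3.build.macos-%s-release-Rana3Pana3.macQAT' % (qtType.lower(), platform)
--                 dirQAT[(qtVer, "ana3", "d")] = '%sAna3.build.macos-%s-debug-Rana3Pana3.macQAT'   % (qtType.lower(), platform)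
--             elif target == "brewA":
--                 dirQAT[(qtVer, "brewA", "r")] = '%sBrew.build.macos-%s-release-Rhb34Phbauto.macQAT' % (qtType.lower(), platform)
--                 dirQAT[(qtVer, "brewA", "d")] = '%sBrew.build.macos-%s-debug-Rhb34Phbauto.macQAT'   % (qtType.lower(), platform)
--             elif target == "brewAHW":
--                 dirQAT[(qtVer, "brewAHW", "r")] = '%sBrew.build.macos-%s-release-RsysPhbauto.macQAT' % (qtType.lower(), platform)
--                 dirQAT[(qtVer, "brewAHW", "d")] = '%sBrew.build.macos-%s-debug-RsysPhbauto.macQAT'   % (qtType.lower(), platform)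
--             elif target == "pbrew":
--                 dirQAT[(qtVer, "pbrew", "r")] = '%sMP.build.macos-%s-release-Rhb34Phb312.macQAT' % (qtType.lower(), platform)
--                 dirQAT[(qtVer, "pbrew", "d")] = '%sMP.build.macos-%s-debug-Rhb34Phb312.macQAT'   % (qtType.lower(), platform)
--             elif target == "pbrewHW":
--                 dirQAT[(qtVer, "pbrewHW", "r")] = '%sMP.build.macos-%s-release-RsysPhb311.macQAT' % (qtType.lower(), platform)
--                 dirQAT[(qtVer, "pbrewHW", "d")] = '%sMP.build.macos-%s-debug-RsysPhb311.macQAT'   % (qtType.lower(), platform)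
--
--     return dirQAT
-- ===== SOURCE B (Python) =====
-- # B: two staged passes instead of A's overwriting double loop -- first dedupe the known
-- # targets from targetDic's values (first-occurrence order), then emit every
-- # (qtVer, target, mode) entry of the product in one dict comprehension with no
-- # overwriting and no per-target branch chain.
-- _SPEC = {
--     "std":     ("MP",   "RsysPsys"),
--     "ports":   ("MP",   "Rmp33Pmp312"),
--     "brew":    ("Brew", "Rhb34Phb312"),
--     "brewHW":  ("Brew", "RsysPhb311"),
--     "ana3":    ("Ana3", "Rana3Pana3"),
--     "brewA":   ("Brew", "Rhb34Phbauto"),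
--     "brewAHW": ("Brew", "RsysPhbauto"),
--     "pbrew":   ("MP",   "Rhb34Phb312"),
--     "pbrewHW": ("MP",   "RsysPhb311"),
-- }
--
-- def Get_QAT_Directory(targetDic, platform):
--     # pass 1: distinct known targets, in first-occurrence order
--     order = []
--     for t in targetDic.values():
--         if t in _SPEC and t not in order:
--             order.append(t)
--     # pass 2: one comprehension over the (qtVer, target, mode) product
--     return {
--         (q, t, m): "%s%s.build.macos-%s-%s-%s.macQAT" % (qt, _SPEC[t][0], platform, mode, _SPEC[t][1])
--         for q, qt in ((5, "qt5"), (6, "qt6"))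
--         for t in order
--         for m, mode in (("r", "release"), ("d", "debug"))
--     }
-- ===== Notes on version B (the rewrite author's own statement) =====
-- stated objective: simpler
-- what changed: Replaces A's overwriting double loop with its nine-branch elif chain by two staged passes: first a dedup pass collecting the distinct known targets in first-occurrence order, then a single dict comprehension over the (qtVer, target, mode) product driven by a _SPEC table, so no entry is ever overwritten and no branch chain exists.
import Mathlib
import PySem

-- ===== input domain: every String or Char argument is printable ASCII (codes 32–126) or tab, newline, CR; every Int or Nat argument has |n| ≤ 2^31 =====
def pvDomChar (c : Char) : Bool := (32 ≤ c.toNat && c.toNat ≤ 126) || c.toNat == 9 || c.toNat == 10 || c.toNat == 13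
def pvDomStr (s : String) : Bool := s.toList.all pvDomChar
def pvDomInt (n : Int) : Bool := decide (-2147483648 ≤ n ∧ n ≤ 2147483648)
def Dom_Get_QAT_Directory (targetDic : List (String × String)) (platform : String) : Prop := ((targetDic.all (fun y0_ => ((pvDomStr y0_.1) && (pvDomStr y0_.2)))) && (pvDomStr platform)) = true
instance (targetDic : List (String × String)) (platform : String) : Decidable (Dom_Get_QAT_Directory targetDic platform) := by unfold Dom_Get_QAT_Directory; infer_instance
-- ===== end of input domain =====

-- B replaces A's overwriting double loop + nine-branch elif chain by two staged passes
-- (dedup the known targets, then one comprehension over the product); objective: simpler.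

-- ===== PORT A =====
-- the body of A's inner 'for key in targetDic.keys():' loop (the nine-branch elif chain)
def pvStepA (platform : String) (qtVer : Int) (qtType : String)
    (dirQAT : PySem.Dict (Int × String × String) String) (target : String) :
    PySem.Dict (Int × String × String) String :=
  if target == "std" then
    ((dirQAT.insert (qtVer, "std", "r") (PySem.Str.lower qtType ++ "MP.build.macos-" ++ platform ++ "-release-RsysPsys.macQAT")).insert
      (qtVer, "std", "d") (PySem.Str.lower qtType ++ "MP.build.macos-" ++ platform ++ "-debug-RsysPsys.macQAT"))
  else if target == "ports" then
    ((dirQAT.insert (qtVer, "ports", "r") (PySem.Str.lower qtType ++ "MP.build.macos-" ++ platform ++ "-release-Rmp33Pmp312.macQAT")).insert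
      (qtVer, "ports", "d") (PySem.Str.lower qtType ++ "MP.build.macos-" ++ platform ++ "-debug-Rmp33Pmp312.macQAT"))
  else if target == "brew" then
    ((dirQAT.insert (qtVer, "brew", "r") (PySem.Str.lower qtType ++ "Brew.build.macos-" ++ platform ++ "-release-Rhb34Phb312.macQAT")).insert
      (qtVer, "brew", "d") (PySem.Str.lower qtType ++ "Brew.build.macos-" ++ platform ++ "-debug-Rhb34Phb312.macQAT"))
  else if target == "brewHW" then
    ((dirQAT.insert (qtVer, "brewHW", "r") (PySem.Str.lower qtType ++ "Brew.build.macos-" ++ platform ++ "-release-RsysPhb311.macQAT")).insert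
      (qtVer, "brewHW", "d") (PySem.Str.lower qtType ++ "Brew.build.macos-" ++ platform ++ "-debug-RsysPhb311.macQAT"))
  else if target == "ana3" then
    ((dirQAT.insert (qtVer, "ana3", "r") (PySem.Str.lower qtType ++ "Ana3.build.macos-" ++ platform ++ "-release-Rana3Pana3.macQAT")).insert
      (qtVer, "ana3", "d") (PySem.Str.lower qtType ++ "Ana3.build.macos-" ++ platform ++ "-debug-Rana3Pana3.macQAT"))
  else if target == "brewA" then
    ((dirQAT.insert (qtVer, "brewA", "r") (PySem.Str.lower qtType ++ "Brew.build.macos-" ++ platform ++ "-release-Rhb34Phbauto.macQAT")).insert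
      (qtVer, "brewA", "d") (PySem.Str.lower qtType ++ "Brew.build.macos-" ++ platform ++ "-debug-Rhb34Phbauto.macQAT"))
  else if target == "brewAHW" then
    ((dirQAT.insert (qtVer, "brewAHW", "r") (PySem.Str.lower qtType ++ "Brew.build.macos-" ++ platform ++ "-release-RsysPhbauto.macQAT")).insert
      (qtVer, "brewAHW", "d") (PySem.Str.lower qtType ++ "Brew.build.macos-" ++ platform ++ "-debug-RsysPhbauto.macQAT"))
  else if target == "pbrew" then
    ((dirQAT.insert (qtVer, "pbrew", "r") (PySem.Str.lower qtType ++ "MP.build.macos-" ++ platform ++ "-release-Rhb34Phb312.macQAT")).insert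
      (qtVer, "pbrew", "d") (PySem.Str.lower qtType ++ "MP.build.macos-" ++ platform ++ "-debug-Rhb34Phb312.macQAT"))
  else if target == "pbrewHW" then
    ((dirQAT.insert (qtVer, "pbrewHW", "r") (PySem.Str.lower qtType ++ "MP.build.macos-" ++ platform ++ "-release-RsysPhb311.macQAT")).insert
      (qtVer, "pbrewHW", "d") (PySem.Str.lower qtType ++ "MP.build.macos-" ++ platform ++ "-debug-RsysPhb311.macQAT"))
  else dirQAT

-- '%s' formatting is ported as string concatenation (exact on the ASCII domain);
-- 'target = targetDic[key]' uses get? with a .getD "" totality guard (key always comes from keys, so it is never hit);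
-- 'qtType' falls to "Qt6" in the else arm: the loop literal [5, 6] supplies only 5 and 6, as in A.
def Get_QAT_Directory (targetDic : List (String × String)) (platform : String) : List (Int × String × String × String) :=
  (([(5 : Int), 6]).foldl
    (fun dirQAT qtVer =>
      let qtType := if qtVer == 5 then "Qt5" else "Qt6"
      (PySem.Dict.keys (PySem.Dict.mk targetDic)).foldl
        (fun dirQAT key =>
          pvStepA platform qtVer qtType dirQAT ((PySem.Dict.get? (PySem.Dict.mk targetDic) key).getD ""))
        dirQAT)
    PySem.Dict.empty).items.map (fun p => (p.1.1, p.1.2.1, p.1.2.2, p.2))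

-- ===== PORT B =====
-- the _SPEC table of Source B: target ↦ (build prefix, spec tag)
def pvSpecTab : PySem.Dict String (String × String) := PySem.Dict.mk
  [("std", ("MP", "RsysPsys")), ("ports", ("MP", "Rmp33Pmp312")), ("brew", ("Brew", "Rhb34Phb312")),
   ("brewHW", ("Brew", "RsysPhb311")), ("ana3", ("Ana3", "Rana3Pana3")), ("brewA", ("Brew", "Rhb34Phbauto")),
   ("brewAHW", ("Brew", "RsysPhbauto")), ("pbrew", ("MP", "Rhb34Phb312")), ("pbrewHW", ("MP", "RsysPhb311"))]

-- "%s%s.build.macos-%s-%s-%s.macQAT" % (qt, pre, platform, mode, spec), ported as concatenation (exact on ASCII)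
def pvDirName (platform qt pre mode spec : String) : String :=
  qt ++ pre ++ ".build.macos-" ++ platform ++ "-" ++ mode ++ "-" ++ spec ++ ".macQAT"

-- pass 1 of Source B ('order'): the distinct known targets in first-occurrence order;
-- pass 2: the dict comprehension over the (qtVer, target, mode) product, built by inserting
-- each generated (key, value) pair into an empty dict in generation order ('_SPEC[t]' is ported
-- as get? with a ("","") totality guard: t comes from order, so it is always in the table).
def Get_QAT_Directory_alt (targetDic : List (String × String)) (platform : String) : List (Int × String × String × String) :=
  let order := (PySem.Dict.values (PySem.Dict.mk targetDic)).foldl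
    (fun ord t => if pvSpecTab.contains t && !(ord.contains t) then ord ++ [t] else ord) []
  let entries := [((5 : Int), "qt5"), (6, "qt6")].flatMap (fun p =>
    order.flatMap (fun t =>
      [("r", "release"), ("d", "debug")].map (fun m =>
        ((p.1, t, m.1),
          pvDirName platform p.2 ((pvSpecTab.get? t).getD ("", "")).1 m.2
            ((pvSpecTab.get? t).getD ("", "")).2))))
  (entries.foldl (fun d e => d.insert e.1 e.2) PySem.Dict.empty).items.map
    (fun p => (p.1.1, p.1.2.1, p.1.2.2, p.2))

-- ===== PRECONDITION & SPEC =====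
-- Pre_ excludes association lists with duplicate keys: they do not represent a Python dict
-- (A's parameter is a dict, whose keys are unique), so nothing is claimed about them.
def Pre_Get_QAT_Directory (targetDic : List (String × String)) (platform : String) : Prop :=
  (targetDic.map Prod.fst).Nodup
instance (targetDic : List (String × String)) (platform : String) : Decidable (Pre_Get_QAT_Directory targetDic platform) := by unfold Pre_Get_QAT_Directory; infer_instance
def pvWitness_Get_QAT_Directory : (List (String × String)) × String := ([("a", "std"), ("b", "junk")], "arm64")

def Spec_Get_QAT_Directory (targetDic : List (String × String)) (platform : String) (out : List (Int × String × String × String)) : Prop := out = Get_QAT_Directory_alt targetDic platform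
instance (targetDic : List (String × String)) (platform : String) (out : List (Int × String × String × String)) : Decidable (Spec_Get_QAT_Directory targetDic platform out) := by unfold Spec_Get_QAT_Directory; infer_instance

-- ===== CLAIM (what is proved, stated in full; the proofs are below) =====
def Claim_equal_Get_QAT_Directory : Prop := ∀ (targetDic : List (String × String)) (platform : String), Dom_Get_QAT_Directory targetDic platform → Pre_Get_QAT_Directory targetDic platform → Spec_Get_QAT_Directory targetDic platform (Get_QAT_Directory targetDic platform)

-- ===== LEMMAS AND PROOFS =====

-- B's insert pair for one (qtVer, target): proof-side abbreviation of two generated inserts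
def pvIns2 (platform : String) (q : Int) (qt : String)
    (d : PySem.Dict (Int × String × String) String) (t : String) :
    PySem.Dict (Int × String × String) String :=
  (d.insert (q, t, "r")
      (pvDirName platform qt ((pvSpecTab.get? t).getD ("", "")).1 "release" ((pvSpecTab.get? t).getD ("", "")).2)).insert
    (q, t, "d")
      (pvDirName platform qt ((pvSpecTab.get? t).getD ("", "")).1 "debug" ((pvSpecTab.get? t).getD ("", "")).2)

-- the dedup tail: the NEW known targets of vs, given that ord has already been collected
def pvDedup : List String → List String → List String
  | _, [] => []
  | ord, t :: ts =>
    if pvSpecTab.contains t && !(ord.contains t) then t :: pvDedup (ord ++ [t]) ts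
    else pvDedup ord ts

lemma pvFmt (platform qt pre mode spec big tail : String)
    (hbig : big = pre ++ ".build.macos-") (htail : tail = "-" ++ mode ++ "-" ++ spec ++ ".macQAT") :
    qt ++ big ++ platform ++ tail = pvDirName platform qt pre mode spec := by
  subst hbig htail
  unfold pvDirName
  apply String.toList_injective
  simp [String.toList_append]

-- A's branch chain agrees, branch by branch, with B's table-driven pair of inserts
lemma pvStepA_eq (platform : String) (q : Int) (qtType qt : String)
    (hq : PySem.Str.lower qtType = qt)
    (d : PySem.Dict (Int × String × String) String) (t : String) :
    pvStepA platform q qtType d t = if pvSpecTab.contains t then pvIns2 platform q qt d t else d := by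
  unfold pvStepA pvIns2
  by_cases h1 : t = "std"
  · subst h1
    have e1 := pvFmt platform qt "MP" "release" "RsysPsys" "MP.build.macos-" "-release-RsysPsys.macQAT" rfl rfl
    have e2 := pvFmt platform qt "MP" "debug" "RsysPsys" "MP.build.macos-" "-debug-RsysPsys.macQAT" rfl rfl
    simp [hq, e1, e2, pvSpecTab, PySem.Dict.get?_mk_cons]
  by_cases h2 : t = "ports"
  · subst h2
    have e1 := pvFmt platform qt "MP" "release" "Rmp33Pmp312" "MP.build.macos-" "-release-Rmp33Pmp312.macQAT" rfl rfl
    have e2 := pvFmt platform qt "MP" "debug" "Rmp33Pmp312" "MP.build.macos-" "-debug-Rmp33Pmp312.macQAT" rfl rfl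
    simp [hq, e1, e2, pvSpecTab, PySem.Dict.get?_mk_cons]
  by_cases h3 : t = "brew"
  · subst h3
    have e1 := pvFmt platform qt "Brew" "release" "Rhb34Phb312" "Brew.build.macos-" "-release-Rhb34Phb312.macQAT" rfl rfl
    have e2 := pvFmt platform qt "Brew" "debug" "Rhb34Phb312" "Brew.build.macos-" "-debug-Rhb34Phb312.macQAT" rfl rfl
    simp [hq, e1, e2, pvSpecTab, PySem.Dict.get?_mk_cons]
  by_cases h4 : t = "brewHW"
  · subst h4
    have e1 := pvFmt platform qt "Brew" "release" "RsysPhb311" "Brew.build.macos-" "-release-RsysPhb311.macQAT" rfl rfl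
    have e2 := pvFmt platform qt "Brew" "debug" "RsysPhb311" "Brew.build.macos-" "-debug-RsysPhb311.macQAT" rfl rfl
    simp [hq, e1, e2, pvSpecTab, PySem.Dict.get?_mk_cons]
  by_cases h5 : t = "ana3"
  · subst h5
    have e1 := pvFmt platform qt "Ana3" "release" "Rana3Pana3" "Ana3.build.macos-" "-release-Rana3Pana3.macQAT" rfl rfl
    have e2 := pvFmt platform qt "Ana3" "debug" "Rana3Pana3" "Ana3.build.macos-" "-debug-Rana3Pana3.macQAT" rfl rfl
    simp [hq, e1, e2, pvSpecTab, PySem.Dict.get?_mk_cons]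
  by_cases h6 : t = "brewA"
  · subst h6
    have e1 := pvFmt platform qt "Brew" "release" "Rhb34Phbauto" "Brew.build.macos-" "-release-Rhb34Phbauto.macQAT" rfl rfl
    have e2 := pvFmt platform qt "Brew" "debug" "Rhb34Phbauto" "Brew.build.macos-" "-debug-Rhb34Phbauto.macQAT" rfl rfl
    simp [hq, e1, e2, pvSpecTab, PySem.Dict.get?_mk_cons]
  by_cases h7 : t = "brewAHW"
  · subst h7
    have e1 := pvFmt platform qt "Brew" "release" "RsysPhbauto" "Brew.build.macos-" "-release-RsysPhbauto.macQAT" rfl rfl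
    have e2 := pvFmt platform qt "Brew" "debug" "RsysPhbauto" "Brew.build.macos-" "-debug-RsysPhbauto.macQAT" rfl rfl
    simp [hq, e1, e2, pvSpecTab, PySem.Dict.get?_mk_cons]
  by_cases h8 : t = "pbrew"
  · subst h8
    have e1 := pvFmt platform qt "MP" "release" "Rhb34Phb312" "MP.build.macos-" "-release-Rhb34Phb312.macQAT" rfl rfl
    have e2 := pvFmt platform qt "MP" "debug" "Rhb34Phb312" "MP.build.macos-" "-debug-Rhb34Phb312.macQAT" rfl rfl
    simp [hq, e1, e2, pvSpecTab, PySem.Dict.get?_mk_cons]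
  by_cases h9 : t = "pbrewHW"
  · subst h9
    have e1 := pvFmt platform qt "MP" "release" "RsysPhb311" "MP.build.macos-" "-release-RsysPhb311.macQAT" rfl rfl
    have e2 := pvFmt platform qt "MP" "debug" "RsysPhb311" "MP.build.macos-" "-debug-RsysPhb311.macQAT" rfl rfl
    simp [hq, e1, e2, pvSpecTab, PySem.Dict.get?_mk_cons]
  · simp [pvSpecTab, h1, h2, h3, h4, h5, h6, h7, h8, h9,
      Ne.symm h1, Ne.symm h2, Ne.symm h3, Ne.symm h4, Ne.symm h5, Ne.symm h6, Ne.symm h7,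
      Ne.symm h8, Ne.symm h9]

-- inserting an already-present (key, value) pair changes nothing
lemma pvInsert_noop {κ ν : Type} [BEq κ] [LawfulBEq κ] (d : PySem.Dict κ ν) (k : κ) (v : ν)
    (hnd : d.keys.Nodup) (h : d.get? k = some v) : d.insert k v = d := by
  have hc : d.contains k = true := by
    rw [PySem.Dict.contains_eq_isSome_get?, h]; rfl
  apply PySem.Dict.ext
  rw [PySem.Dict.items_insert]
  simp only [hc, if_true]
  have : ∀ p ∈ d.items, (fun p : κ × ν => if p.1 == k then (k, v) else p) p = id p := by
    intro p hp
    obtain ⟨a, b⟩ := p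
    by_cases hpk : a = k
    · have hv : d.get? a = some b := PySem.Dict.get?_of_mem_items d hp hnd
      rw [hpk, h] at hv
      simp [hpk, ← Option.some_inj.mp hv]
    · simp [hpk]
  rw [List.map_congr_left this, List.map_id]

-- B's dedup loop = already-collected prefix ++ the new tail
lemma pvFoldDedup (vs : List String) (ord : List String) :
    vs.foldl (fun ord t => if pvSpecTab.contains t && !(ord.contains t) then ord ++ [t] else ord) ord
      = ord ++ pvDedup ord vs := by
  induction vs generalizing ord with
  | nil => simp [pvDedup]
  | cons t ts ih =>
    simp only [List.foldl_cons, pvDedup]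
    by_cases hc : (pvSpecTab.contains t && !(ord.contains t)) = true
    · simp only [if_pos hc, ih (ord ++ [t]), List.append_assoc, List.singleton_append]
    · simp only [if_neg hc, ih ord]

-- a pvIns2 loop keeps the key list duplicate-free
lemma pvFoldIns2_nodup (platform : String) (q : Int) (qt : String) (l : List String)
    (d : PySem.Dict (Int × String × String) String) (h : d.keys.Nodup) :
    (l.foldl (pvIns2 platform q qt) d).keys.Nodup := by
  induction l generalizing d with
  | nil => exact h
  | cons t ts ih =>
    simp only [List.foldl_cons]
    exact ih _ (PySem.Dict.nodup_keys_insert _ _ _ (PySem.Dict.nodup_keys_insert _ _ _ h))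

-- MAIN INVARIANT: A's fold over all values = B's fold over the deduped new targets,
-- provided d already holds B's entries for every known target collected in ord
lemma pvFold_eq (platform : String) (q : Int) (qtType qt : String)
    (hq : PySem.Str.lower qtType = qt) (vs : List String) (ord : List String)
    (d : PySem.Dict (Int × String × String) String) (hnd : d.keys.Nodup)
    (H : ∀ t ∈ ord, pvSpecTab.contains t = true →
      d.get? (q, t, "r") = some (pvDirName platform qt ((pvSpecTab.get? t).getD ("", "")).1 "release" ((pvSpecTab.get? t).getD ("", "")).2) ∧
      d.get? (q, t, "d") = some (pvDirName platform qt ((pvSpecTab.get? t).getD ("", "")).1 "debug" ((pvSpecTab.get? t).getD ("", "")).2)) :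
    vs.foldl (pvStepA platform q qtType) d = (pvDedup ord vs).foldl (pvIns2 platform q qt) d := by
  induction vs generalizing ord d with
  | nil => simp [pvDedup]
  | cons t ts ih =>
    simp only [List.foldl_cons, pvDedup]
    rw [pvStepA_eq platform q qtType qt hq]
    by_cases hk : pvSpecTab.contains t = true
    · by_cases hm : t ∈ ord
      · -- t already collected: both inserts are no-ops, dedup skips t
        have hmem : ord.contains t = true := by simp [hm]
        have hH := H t hm hk
        have h1 : d.insert (q, t, "r")
            (pvDirName platform qt ((pvSpecTab.get? t).getD ("", "")).1 "release" ((pvSpecTab.get? t).getD ("", "")).2) = d :=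
          pvInsert_noop d _ _ hnd hH.1
        have h2 : pvIns2 platform q qt d t = d := by
          unfold pvIns2
          rw [h1]
          exact pvInsert_noop d _ _ hnd hH.2
        simp only [hk, if_true, h2, hmem, Bool.not_true, Bool.and_false]
        exact ih ord d hnd H
      · -- a new known target: both sides insert its two entries
        have hmem : ord.contains t = false := by simp [hm]
        simp only [hk, if_true, hmem, Bool.not_false, Bool.and_true, List.foldl_cons]
        apply ih (ord ++ [t])
        · exact PySem.Dict.nodup_keys_insert _ _ _ (PySem.Dict.nodup_keys_insert _ _ _ hnd)
        · intro t' ht' hk'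
          rcases List.mem_append.mp ht' with h | h
          · have hne : t' ≠ t := fun he => hm (he ▸ h)
            unfold pvIns2
            simp only [PySem.Dict.get?_insert]
            simp only [if_neg (show ¬ (((q, t', "r") : Int × String × String) = (q, t, "d")) by simp [hne]),
              if_neg (show ¬ (((q, t', "r") : Int × String × String) = (q, t, "r")) by simp [hne]),
              if_neg (show ¬ (((q, t', "d") : Int × String × String) = (q, t, "d")) by simp [hne]),
              if_neg (show ¬ (((q, t', "d") : Int × String × String) = (q, t, "r")) by simp [hne])]
            exact H t' h hk'
          · have ht : t' = t := by simpa using h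
            subst ht
            unfold pvIns2
            simp only [PySem.Dict.get?_insert]
            simp
    · -- unknown target: both sides skip
      have hkf : pvSpecTab.contains t = false := by simpa using hk
      rw [if_neg hk,
          if_neg (show ¬ ((pvSpecTab.contains t && !(ord.contains t)) = true) by simp [hkf])]
      exact ih ord d hnd H

-- A's inner keys-and-lookup loop is a fold of pvStepA over the dict's values
lemma pvInner_eq (targetDic : List (String × String)) (platform : String)
    (hnd : (PySem.Dict.mk targetDic).keys.Nodup) (q : Int) (qtType : String)
    (d0 : PySem.Dict (Int × String × String) String) :
    (PySem.Dict.keys (PySem.Dict.mk targetDic)).foldl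
      (fun dirQAT key =>
        pvStepA platform q qtType dirQAT ((PySem.Dict.get? (PySem.Dict.mk targetDic) key).getD ""))
      d0
    = (PySem.Dict.values (PySem.Dict.mk targetDic)).foldl (pvStepA platform q qtType) d0 := by
  rw [PySem.Dict.values_eq_map_keys _ hnd "", List.foldl_map]
  apply List.foldl_ext
  intro acc k _
  rw [PySem.Dict.getD_eq_get?_getD]

-- B's fold of single inserts over one qt-block of generated entries = a pvIns2 fold
lemma pvBfold (platform : String) (p : Int × String) (ord : List String)
    (d : PySem.Dict (Int × String × String) String) :
    ((ord.flatMap (fun t =>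
        [("r", "release"), ("d", "debug")].map (fun m =>
          ((p.1, t, m.1),
            pvDirName platform p.2 ((pvSpecTab.get? t).getD ("", "")).1 m.2
              ((pvSpecTab.get? t).getD ("", "")).2)))).foldl
      (fun d e => d.insert e.1 e.2) d)
    = ord.foldl (pvIns2 platform p.1 p.2) d := by
  rw [List.foldl_flatMap]
  simp only [List.foldl_map, List.foldl_cons, List.foldl_nil]
  rfl

-- ===== VERDICT (by name: the statement is the Claim_ definition above) =====
theorem Get_QAT_Directory_spec : Claim_equal_Get_QAT_Directory := by
  intro targetDic platform _ hpre
  unfold Spec_Get_QAT_Directory Get_QAT_Directory Get_QAT_Directory_alt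
  have hnd : (PySem.Dict.mk targetDic).keys.Nodup := by
    simpa [PySem.Dict.keys] using hpre
  simp only [List.foldl_cons, List.foldl_nil, List.flatMap_cons, List.flatMap_nil,
    List.foldl_append, List.append_nil,
    show (if ((5 : Int) == 5) = true then "Qt5" else "Qt6") = "Qt5" from rfl,
    show (if ((6 : Int) == 5) = true then "Qt5" else "Qt6") = "Qt6" from rfl]
  rw [pvInner_eq targetDic platform hnd 5 "Qt5", pvInner_eq targetDic platform hnd 6 "Qt6",
      pvBfold platform (5, "qt5"), pvBfold platform (6, "qt6"),
      pvFoldDedup, List.nil_append,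
      pvFold_eq platform 5 "Qt5" "qt5" (by decide) _ [] PySem.Dict.empty
        (PySem.Dict.nodup_keys_empty) (by intro t ht; simp at ht),
      pvFold_eq platform 6 "Qt6" "qt6" (by decide) _ [] _
        (pvFoldIns2_nodup platform 5 "qt5" _ _ PySem.Dict.nodup_keys_empty)
        (by intro t ht; simp at ht)]
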